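-- pv_equiv track=rewrite | github.com/Dave11233/leetcode | nowcoder/HJ17.py | coordinateMoving
-- ===== SOURCE A (Python) =====
-- from typing import List
--
-- def coordinateMoving(cmd: List[str]) -> List[int]:
--     if not cmd:
--         return [0, 0]
--     ans = [0, 0]
--     for item in cmd:
--         if item.startswith("A"):
--             step = item[1:]
--             if step.isdigit():
--                 step = int(step)
--                 ans[0] -= step
--         elif item.startswith("D"):
--             step = item[1:]
--             if step.isdigit():
--                 step = int(step)
--                 ans[0] += step
--         elif item.startswith("W"):
--             step = item[1:]
--             if step.isdigit():
--                 step = int(step)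
--                 ans[1] += step
--         elif item.startswith("S"):
--             step = item[1:]
--             if step.isdigit():
--                 step = int(step)
--                 ans[1] -= step
--         else:
--             continue
--     return ans
-- ===== SOURCE B (Python) =====
-- from typing import List
--
-- def coordinateMoving(cmd: List[str]) -> List[int]:
--     def val(item: str, d: str) -> int:
--         rest = item[1:]
--         return int(rest) if item[:1] == d and rest.isdigit() else 0
--     x = sum(val(it, "D") for it in cmd) - sum(val(it, "A") for it in cmd)
--     y = sum(val(it, "W") for it in cmd) - sum(val(it, "S") for it in cmd)
--     return [x, y]
-- ===== Notes on version B (the rewrite author's own statement) =====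
-- stated objective: alternative
-- what changed: Replaces A's single stateful loop that mutates ans through a four-way branch chain with a stateless per-axis formulation: each axis is computed as the difference of two filtered sums of the commands' step values (D minus A, W minus S), combined arithmetically at the end.
import Mathlib
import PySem

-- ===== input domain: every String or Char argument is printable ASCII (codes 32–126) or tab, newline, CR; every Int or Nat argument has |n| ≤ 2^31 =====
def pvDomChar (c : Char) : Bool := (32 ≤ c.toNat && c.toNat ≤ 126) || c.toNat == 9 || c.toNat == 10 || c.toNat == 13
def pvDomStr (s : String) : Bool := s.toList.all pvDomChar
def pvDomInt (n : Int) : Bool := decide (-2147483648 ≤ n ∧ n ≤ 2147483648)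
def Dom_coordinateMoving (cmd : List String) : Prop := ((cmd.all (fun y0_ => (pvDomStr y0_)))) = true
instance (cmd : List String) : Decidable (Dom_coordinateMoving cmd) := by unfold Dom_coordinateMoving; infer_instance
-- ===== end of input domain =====

-- B: stateless per-axis formulation — each coordinate is a difference of two filtered sums,
-- instead of A's single loop mutating an accumulator through a four-way branch chain (alternative; same cost).

-- ===== PORT A =====
-- ans = [ans0, ans1]; the in-place list mutation is modelled by threading the pair through the loop.
def coordinateMovingStepA (ans : Int × Int) (item : String) : Int × Int :=
  if PySem.Str.startswith item "A" then
    let step := PySem.Str.slice item (some 1) none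
    if PySem.Str.strIsdigit step then (ans.1 - (PySem.Int.ofStr? step).getD 0, ans.2) else ans
  else if PySem.Str.startswith item "D" then
    let step := PySem.Str.slice item (some 1) none
    if PySem.Str.strIsdigit step then (ans.1 + (PySem.Int.ofStr? step).getD 0, ans.2) else ans
  else if PySem.Str.startswith item "W" then
    let step := PySem.Str.slice item (some 1) none
    if PySem.Str.strIsdigit step then (ans.1, ans.2 + (PySem.Int.ofStr? step).getD 0) else ans
  else if PySem.Str.startswith item "S" then
    let step := PySem.Str.slice item (some 1) none
    if PySem.Str.strIsdigit step then (ans.1, ans.2 - (PySem.Int.ofStr? step).getD 0) else ans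
  else ans

def coordinateMoving (cmd : List String) : List Int :=
  if cmd.isEmpty then [0, 0]
  else
    let a := cmd.foldl coordinateMovingStepA (0, 0)
    [a.1, a.2]

-- ===== PORT B =====
-- val(item, d): the step value of item if it is a d-command, else 0.
def pvVal (item : String) (d : String) : Int :=
  let rest := PySem.Str.slice item (some 1) none
  if (PySem.Str.slice item none (some 1) == d) && PySem.Str.strIsdigit rest then
    (PySem.Int.ofStr? rest).getD 0
  else 0

def coordinateMoving_alt (cmd : List String) : List Int :=
  let x := (cmd.map (fun it => pvVal it "D")).sum - (cmd.map (fun it => pvVal it "A")).sum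
  let y := (cmd.map (fun it => pvVal it "W")).sum - (cmd.map (fun it => pvVal it "S")).sum
  [x, y]

-- ===== PRECONDITION & SPEC =====
def Spec_coordinateMoving (cmd : List String) (out : List Int) : Prop := out = coordinateMoving_alt cmd
instance (cmd : List String) (out : List Int) : Decidable (Spec_coordinateMoving cmd out) := by unfold Spec_coordinateMoving; infer_instance

-- ===== CLAIM (what is proved, stated in full; the proofs are below) =====
def Claim_equal_coordinateMoving : Prop := ∀ (cmd : List String), Dom_coordinateMoving cmd → Spec_coordinateMoving cmd (coordinateMoving cmd)

-- ===== LEMMAS AND PROOFS =====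
theorem slice_head (c : Char) (cs : List Char) (s : String) (h : s.toList = c :: cs) :
    PySem.Str.slice s none (some 1) = String.ofList [c] := by
  have h2 : (PySem.Str.slice s none (some 1)).toList = [c] := by simp [pysem, h]
  have := congrArg String.ofList h2
  simpa [String.ofList_toList] using this

theorem slice_nil (s : String) (h : s.toList = []) :
    PySem.Str.slice s none (some 1) = "" := by
  have hs : s = "" := by
    have := congrArg String.ofList h
    simpa [String.ofList_toList] using this
  subst hs; decide

theorem startswith_head (c a : Char) (cs : List Char) (s : String) (h : s.toList = c :: cs)
    (p : String) (hp : p.toList = [a]) :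
    PySem.Str.startswith s p = (c == a) := by
  simp [PySem.Str.startswith_eq, h, hp, PySem.Chars.startswith, List.isPrefixOf, eq_comm]

theorem beq_single (c a : Char) (k : String) (hk : k.toList = [a]) :
    (String.ofList [c] == k) = (c == a) := by
  have hkk : k = String.ofList [a] := by
    have := congrArg String.ofList hk
    rwa [String.ofList_toList] at this
  subst hkk
  by_cases h : c = a
  · simp [h]
  · have hne : String.ofList [c] ≠ String.ofList [a] := by
      intro he; apply h
      have := congrArg String.toList he; simpa using this
    simp [hne, h]

theorem coordinateMovingStep_eq (st : Int × Int) (item : String) :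
    coordinateMovingStepA st item =
      (st.1 + pvVal item "D" - pvVal item "A", st.2 + pvVal item "W" - pvVal item "S") := by
  unfold coordinateMovingStepA pvVal
  cases hl : item.toList with
  | nil =>
    have hsw : ∀ p : String, p.toList ≠ [] → PySem.Str.startswith item p = false := by
      intro p hp
      simp only [PySem.Str.startswith_eq, hl]
      cases hq : p.toList with
      | nil => exact absurd hq hp
      | cons a as => simp [PySem.Chars.startswith, List.isPrefixOf]
    rw [hsw "A" (by decide), hsw "D" (by decide), hsw "W" (by decide), hsw "S" (by decide),
        slice_nil item hl]
    simp
  | cons c cs =>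
    rw [slice_head c cs item hl,
        startswith_head c 'A' cs item hl "A" rfl, startswith_head c 'D' cs item hl "D" rfl,
        startswith_head c 'W' cs item hl "W" rfl, startswith_head c 'S' cs item hl "S" rfl,
        beq_single c 'D' "D" rfl, beq_single c 'A' "A" rfl,
        beq_single c 'W' "W" rfl, beq_single c 'S' "S" rfl]
    by_cases hdig : PySem.Chars.strIsdigit (PySem.List.slice item.toList (some 1) none) = true <;>
      by_cases hA : c = 'A' <;> by_cases hD : c = 'D' <;>
      by_cases hW : c = 'W' <;> by_cases hS : c = 'S' <;>
      simp_all [sub_eq_add_neg]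

theorem foldlA_eq (cmd : List String) : ∀ st : Int × Int,
    cmd.foldl coordinateMovingStepA st =
      (st.1 + (cmd.map (fun it => pvVal it "D")).sum - (cmd.map (fun it => pvVal it "A")).sum,
       st.2 + (cmd.map (fun it => pvVal it "W")).sum - (cmd.map (fun it => pvVal it "S")).sum) := by
  induction cmd with
  | nil => intro st; simp
  | cons x xs ih =>
    intro st
    simp only [List.foldl_cons, List.map_cons, List.sum_cons]
    rw [coordinateMovingStep_eq, ih]
    simp only [Prod.mk.injEq]
    constructor <;> ring

-- ===== VERDICT (by name: the statement is the Claim_ definition above) =====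
theorem coordinateMoving_spec : Claim_equal_coordinateMoving := by
  intro cmd _
  unfold Spec_coordinateMoving coordinateMoving coordinateMoving_alt
  cases cmd with
  | nil => simp
  | cons x xs =>
    simp only [List.isEmpty_cons, if_neg (by simp : ¬ (false = true))]
    rw [foldlA_eq]
    simp
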